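-- pv_equiv track=rewrite | github.com/Eric-Xu/streamlit-hmm-nj-tr-pr-20250203 | utils/borrower.py | get_borrower_to_lenders
-- ===== SOURCE A (Python) =====
-- from typing import Dict, List, Set
--
-- def get_borrower_to_lenders(prepped_data: List[Dict]) -> Dict[str, Set[str]]:
--     """
--     For each borrower (buyerName), return a list of unique lender names they've used.
--     """
--     borrower_to_lenders: Dict[str, set] = {}
--     for record in prepped_data:
--         borrower = record.get("buyerName")
--         lender = record.get("lenderName")
--         if not borrower or not lender:
--             continue
--         if borrower not in borrower_to_lenders:
--             borrower_to_lenders[borrower] = set()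
--         borrower_to_lenders[borrower].add(lender)
--
--     return borrower_to_lenders
-- ===== SOURCE B (Python) =====
-- def get_borrower_to_lenders(prepped_data):
--     """
--     For each borrower (buyerName), return the set of unique lender names
--     they've used.  Two-pass: flatten to (borrower, lender) pairs, then
--     group the pairs per distinct borrower.
--     """
--     pairs = [(r.get("buyerName"), r.get("lenderName")) for r in prepped_data]
--     pairs = [(b, l) for b, l in pairs if b and l]
--     borrowers = dict.fromkeys(b for b, _ in pairs)
--     return {b: {l for bb, l in pairs if bb == b} for b in borrowers}
-- ===== Notes on version B (the rewrite author's own statement) =====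
-- stated objective: alternative
-- what changed: B first flattens the records into a filtered (borrower, lender) pair list, then builds the result by mapping each first-occurrence-distinct borrower to the set of its lenders, instead of A's single pass that incrementally inserts into a dict of sets.
import Mathlib
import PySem

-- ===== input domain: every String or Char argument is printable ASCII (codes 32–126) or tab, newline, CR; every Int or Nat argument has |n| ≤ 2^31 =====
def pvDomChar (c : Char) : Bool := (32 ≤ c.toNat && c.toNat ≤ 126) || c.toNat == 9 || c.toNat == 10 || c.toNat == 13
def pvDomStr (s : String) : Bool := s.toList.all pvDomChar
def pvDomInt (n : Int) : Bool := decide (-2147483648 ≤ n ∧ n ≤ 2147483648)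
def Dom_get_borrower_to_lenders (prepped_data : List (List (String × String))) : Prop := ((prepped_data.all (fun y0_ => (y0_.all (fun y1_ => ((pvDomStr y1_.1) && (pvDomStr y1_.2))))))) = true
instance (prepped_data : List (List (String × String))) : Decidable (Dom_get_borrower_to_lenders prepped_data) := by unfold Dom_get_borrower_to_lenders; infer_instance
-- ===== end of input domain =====

-- B re-groups a flattened (borrower, lender) pair list per distinct borrower instead of
-- A's incremental dict-of-sets insertion; objective: alternative decomposition, same cost class.

-- ===== PORT A =====
-- the body of A's 'for record in prepped_data' loop
def pvAStep (borrower_to_lenders : PySem.Dict String (PySem.Set String))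
    (record : List (String × String)) : PySem.Dict String (PySem.Set String) :=
  let borrower := (PySem.Dict.mk record).get? "buyerName"
  let lender := (PySem.Dict.mk record).get? "lenderName"
  match borrower, lender with
  | some b, some l =>
      if b = "" ∨ l = "" then borrower_to_lenders      -- 'if not borrower or not lender: continue'
      else
        let d := if borrower_to_lenders.contains b then borrower_to_lenders
                 else borrower_to_lenders.insert b PySem.Set.empty
        d.modify b PySem.Set.empty (fun s => PySem.Set.add s l)
  | _, _ => borrower_to_lenders

def get_borrower_to_lenders (prepped_data : List (List (String × String))) : List (String × List String) :=
  (prepped_data.foldl pvAStep PySem.Dict.empty).items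

-- ===== PORT B =====
-- Source B's two pair-building comprehensions
def pvBPairs (prepped_data : List (List (String × String))) : List (String × String) :=
  let pairs0 := prepped_data.map
    (fun r => ((PySem.Dict.mk r).get? "buyerName", (PySem.Dict.mk r).get? "lenderName"))
  pairs0.filterMap (fun p => match p.1, p.2 with
    | some b, some l => if b = "" ∨ l = "" then none else some (b, l)   -- 'if b and l'
    | _, _ => none)

def get_borrower_to_lenders_alt (prepped_data : List (List (String × String))) : List (String × List String) :=
  let pairs := pvBPairs prepped_data
  let borrowers := PySem.List.dedup (pairs.map Prod.fst)                -- dict.fromkeys(…)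
  borrowers.map (fun b =>
    (b, PySem.Set.ofList ((pairs.filter (fun p => p.1 == b)).map Prod.snd)))

-- ===== PRECONDITION & SPEC =====
def Spec_get_borrower_to_lenders (prepped_data : List (List (String × String))) (out : List (String × List String)) : Prop := out = get_borrower_to_lenders_alt prepped_data
instance (prepped_data : List (List (String × String))) (out : List (String × List String)) : Decidable (Spec_get_borrower_to_lenders prepped_data out) := by unfold Spec_get_borrower_to_lenders; infer_instance

-- ===== CLAIM (what is proved, stated in full; the proofs are below) =====
def Claim_equal_get_borrower_to_lenders : Prop := ∀ (prepped_data : List (List (String × String))), Dom_get_borrower_to_lenders prepped_data → Spec_get_borrower_to_lenders prepped_data (get_borrower_to_lenders prepped_data)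

-- ===== LEMMAS AND PROOFS =====

-- A's step, restricted to a kept (borrower, lender) pair
def pvPairStep (d : PySem.Dict String (PySem.Set String)) (p : String × String) :
    PySem.Dict String (PySem.Set String) :=
  let d' := if d.contains p.1 then d else d.insert p.1 PySem.Set.empty
  d'.modify p.1 PySem.Set.empty (fun s => PySem.Set.add s p.2)

lemma pvFoldAlign (pd : List (List (String × String)))
    (d : PySem.Dict String (PySem.Set String)) :
    pd.foldl pvAStep d = (pvBPairs pd).foldl pvPairStep d := by
  induction pd generalizing d with
  | nil => rfl
  | cons r rest ih =>
    simp only [List.foldl_cons, pvBPairs, List.map_cons, List.filterMap_cons]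
    rcases hb : (PySem.Dict.mk r).get? "buyerName" with _ | b <;>
      rcases hl : (PySem.Dict.mk r).get? "lenderName" with _ | l <;>
        simp only [pvAStep, hb, hl] <;> try exact ih d
    by_cases hfa : b = "" ∨ l = ""
    · simpa [hfa, pvBPairs] using ih d
    · simpa [hfa, pvBPairs] using ih _

lemma pvStepKeys (d : PySem.Dict String (PySem.Set String)) (p : String × String) :
    (pvPairStep d p).keys = PySem.Set.add d.keys p.1 := by
  unfold pvPairStep
  by_cases h : d.contains p.1 = true
  · have hm : p.1 ∈ d.keys := (PySem.Dict.contains_iff_mem_keys d p.1).mp h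
    simp [h, PySem.Dict.keys_modify, PySem.Dict.keys_insert_of_contains,
      PySem.Set.add_of_mem hm]
  · have hFalse : d.contains p.1 = false := by simpa using h
    have hm : p.1 ∉ d.keys := fun hmem => h ((PySem.Dict.contains_iff_mem_keys d p.1).mpr hmem)
    simp [hFalse, PySem.Dict.keys_modify, PySem.Dict.insert_insert_self,
      PySem.Dict.keys_insert_of_not_contains d _ hFalse, PySem.Set.add_of_not_mem hm]

lemma pvStepGetD (d : PySem.Dict String (PySem.Set String)) (p : String × String) (b : String) :
    (pvPairStep d p).getD b PySem.Set.empty =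
      if b = p.1 then PySem.Set.add (d.getD p.1 PySem.Set.empty) p.2
      else d.getD b PySem.Set.empty := by
  unfold pvPairStep
  by_cases h : d.contains p.1 = true
  · simp [h, PySem.Dict.getD_modify]
  · have hFalse : d.contains p.1 = false := by simpa using h
    have h0' : d.getD p.1 ([] : PySem.Set String) = [] :=
      PySem.Dict.getD_of_not_contains d ([] : PySem.Set String) hFalse
    rw [if_neg (by simp [hFalse]), PySem.Dict.getD_modify, PySem.Dict.getD_insert]
    by_cases hbp : b = p.1
    · simp [hbp, h0', PySem.Set.add]
    · simp [hbp, PySem.Dict.getD_insert]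

lemma pvFoldKeys (ps : List (String × String)) (d : PySem.Dict String (PySem.Set String)) :
    (ps.foldl pvPairStep d).keys = PySem.Set.update d.keys (ps.map Prod.fst) := by
  induction ps generalizing d with
  | nil => simp [PySem.Set.update_nil]
  | cons p rest ih =>
    simp only [List.foldl_cons, List.map_cons, PySem.Set.update_cons, ih, pvStepKeys]

lemma pvFoldGetD (ps : List (String × String)) (d : PySem.Dict String (PySem.Set String))
    (b : String) :
    (ps.foldl pvPairStep d).getD b PySem.Set.empty =
      PySem.Set.update (d.getD b PySem.Set.empty)
        ((ps.filter (fun p => p.1 == b)).map Prod.snd) := by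
  induction ps generalizing d with
  | nil => simp [PySem.Set.update_nil]
  | cons p rest ih =>
    simp only [List.foldl_cons, List.filter_cons]
    by_cases hbp : p.1 = b
    · subst hbp
      rw [ih, pvStepGetD]
      simp [PySem.Set.update_cons]
    · have hne : (p.1 == b) = false := by simpa using hbp
      have hbne : ¬ b = p.1 := fun h => hbp h.symm
      rw [ih, pvStepGetD]
      simp [hne, hbne]

theorem get_borrower_to_lenders_spec : Claim_equal_get_borrower_to_lenders := by
  intro pd _
  show get_borrower_to_lenders pd = get_borrower_to_lenders_alt pd
  unfold get_borrower_to_lenders get_borrower_to_lenders_alt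
  rw [pvFoldAlign]
  set ps := pvBPairs pd with hps
  have hkeys : (ps.foldl pvPairStep PySem.Dict.empty).keys = PySem.Set.ofList (ps.map Prod.fst) := by
    rw [pvFoldKeys]
    simp [PySem.Dict.keys_empty, PySem.Set.update_nil_left]
  have hnd : (ps.foldl pvPairStep PySem.Dict.empty).keys.Nodup := by
    rw [hkeys]; exact PySem.Set.nodup_ofList _
  rw [PySem.Dict.items_eq_map_keys _ hnd PySem.Set.empty, hkeys]
  have halt : (let pairs := ps;
      let borrowers := PySem.List.dedup (pairs.map Prod.fst)
      borrowers.map (fun b =>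
        (b, PySem.Set.ofList ((pairs.filter (fun p => p.1 == b)).map Prod.snd))))
      = (PySem.Set.ofList (ps.map Prod.fst)).map (fun b =>
        (b, PySem.Set.ofList ((ps.filter (fun p => p.1 == b)).map Prod.snd))) := rfl
  rw [halt]
  apply List.map_congr_left
  intro b _
  have := pvFoldGetD ps PySem.Dict.empty b
  rw [PySem.Dict.getD_empty] at this
  rw [this, PySem.Set.update_empty]
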